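-- pv_equiv track=rewrite | github.com/Octawel/Python2023 | Lab3/ex9.py | locuri_nevizibile
-- ===== SOURCE A (Python) =====
-- def locuri_nevizibile(matrice):
--     n = len(matrice)
--     m = len(matrice[0])
--     locuri_nevizibile = []
--
--     for i in range(n):
--         for j in range(m):
--             for k in range(i):
--                 if matrice[k][j] >= matrice[i][j]:
--                     locuri_nevizibile.append((i, j))
--                     break
--
--     return locuri_nevizibile
-- ===== SOURCE B (Python) =====
-- def locuri_nevizibile(matrice):
--     m = len(matrice[0])
--     maxes = matrice[0][:m]
--     res = []
--     for i in range(1, len(matrice)):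
--         row = matrice[i]
--         res.extend((i, j) for j in range(m) if maxes[j] >= row[j])
--         maxes = [b if b > a else a for a, b in zip(maxes, row)]
--     return res
-- ===== Notes on version B (the rewrite author's own statement) =====
-- stated objective: faster
-- what changed: Replaced A's per-cell scan of all rows above (a triple nested loop) by a single row-major pass that keeps a per-column running maximum, comparing each cell against the maximum of its column so far.
import Mathlib
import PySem

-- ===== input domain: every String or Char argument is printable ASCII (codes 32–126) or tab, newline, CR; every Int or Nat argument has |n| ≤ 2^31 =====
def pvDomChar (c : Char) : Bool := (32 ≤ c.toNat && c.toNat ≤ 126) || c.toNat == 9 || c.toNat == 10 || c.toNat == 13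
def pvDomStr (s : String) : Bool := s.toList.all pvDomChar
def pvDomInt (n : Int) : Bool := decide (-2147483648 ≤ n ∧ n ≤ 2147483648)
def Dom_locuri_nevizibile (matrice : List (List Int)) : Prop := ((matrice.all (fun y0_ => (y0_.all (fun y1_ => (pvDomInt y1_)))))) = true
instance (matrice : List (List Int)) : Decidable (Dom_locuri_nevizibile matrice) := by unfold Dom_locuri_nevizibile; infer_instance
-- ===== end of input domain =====

-- B replaces A's cubic "scan all rows above each cell" with one row-major pass
-- keeping a per-column running maximum (objective: faster, asymptotic).

-- ===== PORT A =====
-- inner 'for k in range(i): if …: append; break' — returns true iff some k in ks triggers the break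
def pvFindK (matrice : List (List Int)) (i j : Int) : List Int → Bool
  | [] => false
  | k :: ks =>
    if PySem.List.pyGetD (PySem.List.pyGetD matrice k []) j 0 ≥
       PySem.List.pyGetD (PySem.List.pyGetD matrice i []) j 0
    then true else pvFindK matrice i j ks

def locuri_nevizibile (matrice : List (List Int)) : List (Int × Int) :=
  let n : Int := (matrice.length : Int)
  let m : Int := ((PySem.List.pyGetD matrice 0 []).length : Int)
  (PySem.List.pyRange 0 n 1).foldl (fun acc i =>
    (PySem.List.pyRange 0 m 1).foldl (fun acc j =>
      if pvFindK matrice i j (PySem.List.pyRange 0 i 1) then acc ++ [(i, j)] else acc) acc) []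

-- ===== PORT B =====
def locuri_nevizibile_alt (matrice : List (List Int)) : List (Int × Int) :=
  let m : Int := ((PySem.List.pyGetD matrice 0 []).length : Int)
  let st := (PySem.List.pyRange 1 (matrice.length : Int) 1).foldl
    (fun (st : List Int × List (Int × Int)) i =>
      let row := PySem.List.pyGetD matrice i []
      let res := st.2 ++ (PySem.List.pyRange 0 m 1).filterMap (fun j =>
        if PySem.List.pyGetD st.1 j 0 ≥ PySem.List.pyGetD row j 0 then some (i, j) else none)
      let maxes := List.zipWith (fun a b => if b > a then b else a) st.1 row
      (maxes, res))
    (PySem.List.slice (PySem.List.pyGetD matrice 0 []) none (some m), ([] : List (Int × Int)))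
  st.2

-- ===== PRECONDITION & SPEC =====
-- Python A raises IndexError on an empty matrix (matrice[0]) and on any row
-- shorter than the first (matrice[k][j]); Pre_ admits exactly the inputs where
-- every index A/B touches is in range: a nonempty matrix whose rows are all at
-- least as long as the first row.
def Pre_locuri_nevizibile (matrice : List (List Int)) : Prop :=
  matrice ≠ [] ∧ ∀ row ∈ matrice, (matrice.getD 0 []).length ≤ row.length
instance (matrice : List (List Int)) : Decidable (Pre_locuri_nevizibile matrice) := by
  unfold Pre_locuri_nevizibile; infer_instance
def pvWitness_locuri_nevizibile : List (List Int) := [[1, 2], [0, 3], [2, 1]]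

def Spec_locuri_nevizibile (matrice : List (List Int)) (out : List (Int × Int)) : Prop := out = locuri_nevizibile_alt matrice
instance (matrice : List (List Int)) (out : List (Int × Int)) : Decidable (Spec_locuri_nevizibile matrice out) := by unfold Spec_locuri_nevizibile; infer_instance

-- ===== CLAIM (what is proved, stated in full; the proofs are below) =====
def Claim_equal_locuri_nevizibile : Prop := ∀ (matrice : List (List Int)), Dom_locuri_nevizibile matrice → Pre_locuri_nevizibile matrice → Spec_locuri_nevizibile matrice (locuri_nevizibile matrice)

-- ===== LEMMAS AND PROOFS =====

-- cell (i, j) of the matrix (out-of-range defaults never used under Pre_)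
def pvG (matrice : List (List Int)) (i j : Nat) : Int := (matrice.getD i []).getD j 0

-- running column maximum over rows 0..t
def pvMx (matrice : List (List Int)) : Nat → Nat → Int
  | 0, j => pvG matrice 0 j
  | t + 1, j => max (pvMx matrice t j) (pvG matrice (t + 1) j)

theorem pvMx_ge_iff (matrice : List (List Int)) (t j : Nat) (x : Int) :
    pvMx matrice t j ≥ x ↔ ∃ k ≤ t, pvG matrice k j ≥ x := by
  induction t with
  | zero => simp [pvMx]
  | succ t ih =>
    simp only [pvMx, ge_iff_le, le_max_iff]
    constructor
    · rintro (h | h)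
      · obtain ⟨k, hk, hx⟩ := ih.mp h; exact ⟨k, by omega, hx⟩
      · exact ⟨t + 1, le_refl _, h⟩
    · rintro ⟨k, hk, hx⟩
      rcases Nat.lt_or_ge k (t + 1) with h | h
      · exact Or.inl (ih.mpr ⟨k, by omega, hx⟩)
      · have hk1 : k = t + 1 := by omega
        exact Or.inr (hk1 ▸ hx)

theorem pvFindK_eq_any (matrice : List (List Int)) (i j : Int) (ks : List Int) :
    pvFindK matrice i j ks = ks.any (fun k =>
      PySem.List.pyGetD (PySem.List.pyGetD matrice k []) j 0 ≥
      PySem.List.pyGetD (PySem.List.pyGetD matrice i []) j 0) := by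
  induction ks with
  | nil => rfl
  | cons k ks ih => simp only [pvFindK, List.any_cons, ih]; split <;> simp_all

-- the step function of B's row fold (definitionally the lambda in the port)
def pvStep (matrice : List (List Int)) (m : Int) (st : List Int × List (Int × Int)) (i : Int) :
    List Int × List (Int × Int) :=
  let row := PySem.List.pyGetD matrice i []
  let res := st.2 ++ (PySem.List.pyRange 0 m 1).filterMap (fun j =>
    if PySem.List.pyGetD st.1 j 0 ≥ PySem.List.pyGetD row j 0 then some (i, j) else none)
  let maxes := List.zipWith (fun a b => if b > a then b else a) st.1 row
  (maxes, res)

-- common normal form: invisible cells of rows 1..s, row-major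
def pvRes (matrice : List (List Int)) (m s : Nat) : List (Int × Int) :=
  (List.range' 1 s).flatMap (fun i => (List.range m).filterMap (fun j =>
    if pvMx matrice (i - 1) j ≥ pvG matrice i j then some ((i : Int), (j : Int)) else none))

theorem pvFilterMapIf {α β : Type} (l : List α) (p : α → Bool) (f : α → β) :
    (l.filter p).map f = l.filterMap (fun x => if p x then some (f x) else none) := by
  induction l with
  | nil => rfl
  | cons x xs ih => by_cases h : p x <;> simp [h, ih]

theorem pvCondA (matrice : List (List Int)) (i j : Nat) :
    pvFindK matrice (i : Int) (j : Int) (PySem.List.pyRange 0 (i : Int) 1) =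
      (List.range i).any (fun k => decide (pvG matrice k j ≥ pvG matrice i j)) := by
  rw [pvFindK_eq_any, PySem.List.pyRange_zero_nat, List.any_map]
  simp [pvG, Function.comp_def]

theorem pvCondSucc (matrice : List (List Int)) (i' j : Nat) :
    ((List.range (i' + 1)).any (fun k => decide (pvG matrice k j ≥ pvG matrice (i' + 1) j))) =
      decide (pvMx matrice i' j ≥ pvG matrice (i' + 1) j) := by
  rw [Bool.eq_iff_iff]
  simp [List.any_eq_true, pvMx_ge_iff]

theorem pvA_eq (matrice : List (List Int)) (n' : Nat) (hn : matrice.length = n' + 1) :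
    locuri_nevizibile matrice = pvRes matrice (matrice.getD 0 []).length n' := by
  unfold locuri_nevizibile
  simp only [PySem.List.pyGetD_zero, PySem.List.foldl_append_if,
    PySem.List.foldl_append_eq_flatMap, List.nil_append]
  rw [PySem.List.pyRange_zero_nat, PySem.List.pyRange_zero_nat, List.flatMap_map]
  have hterm : ∀ i : Nat,
      ((((List.range (matrice.getD 0 []).length).map (fun k : Nat => (k : Int))).filter
          (fun j => pvFindK matrice (i : Int) j (PySem.List.pyRange 0 (i : Int) 1))).map
        (fun j => ((i : Int), j))) =
      (List.range (matrice.getD 0 []).length).filterMap (fun j : Nat =>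
        if (List.range i).any (fun k => decide (pvG matrice k j ≥ pvG matrice i j))
        then some ((i : Int), (j : Int)) else none) := by
    intro i
    rw [List.filter_map, List.map_map, pvFilterMapIf]
    apply List.filterMap_congr
    intro j _
    simp only [Function.comp, pvCondA]
  have : (List.range matrice.length).flatMap (fun i : Nat =>
      ((((List.range (matrice.getD 0 []).length).map (fun k : Nat => (k : Int))).filter
          (fun j => pvFindK matrice (i : Int) j (PySem.List.pyRange 0 (i : Int) 1))).map
        (fun j => ((i : Int), j)))) =
      (List.range matrice.length).flatMap (fun i : Nat =>
        (List.range (matrice.getD 0 []).length).filterMap (fun j : Nat =>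
          if (List.range i).any (fun k => decide (pvG matrice k j ≥ pvG matrice i j))
          then some ((i : Int), (j : Int)) else none)) :=
    List.flatMap_congr (fun i _ => hterm i)
  rw [this, hn, show List.range (n' + 1) = 0 :: List.range' 1 n' by
    rw [List.range_eq_range', List.range'_succ], List.flatMap_cons, pvRes]
  have h0 : ((List.range (matrice.getD 0 []).length).filterMap (fun j : Nat =>
      if (List.range 0).any (fun k => decide (pvG matrice k j ≥ pvG matrice 0 j))
      then some (((0 : Nat) : Int), (j : Int)) else none)) = [] := by
    simp
  rw [h0, List.nil_append]
  apply List.flatMap_congr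
  intro i hi
  have h1 : 1 ≤ i := by
    have := List.mem_range'.mp hi
    omega
  obtain ⟨i', rfl⟩ : ∃ i', i = i' + 1 := ⟨i - 1, by omega⟩
  apply List.filterMap_congr
  intro j _
  rw [pvCondSucc]
  simp

theorem pvB_inv (matrice : List (List Int))
    (hpre : Pre_locuri_nevizibile matrice) :
    ∀ s : Nat, s + 1 ≤ matrice.length →
      (PySem.List.pyRange 1 ((s : Int) + 1) 1).foldl
        (pvStep matrice ((matrice.getD 0 []).length : Int))
        (PySem.List.slice (matrice.getD 0 []) none
          (some ((matrice.getD 0 []).length : Int)), ([] : List (Int × Int))) =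
      ((List.range (matrice.getD 0 []).length).map (fun j => pvMx matrice s j),
       pvRes matrice (matrice.getD 0 []).length s) := by
  intro s
  induction s with
  | zero =>
    intro _
    rw [show ((0 : Nat) : Int) + 1 = 1 by norm_num, PySem.List.pyRange_one_eq_nil (by omega),
      List.foldl_nil]
    simp only [PySem.List.slice_to_natCast, pvRes, List.range'_zero, List.flatMap_nil]
    refine Prod.ext ?_ rfl
    rw [List.take_length]
    apply List.ext_getElem
    · simp
    · intro k h1 h2
      simp only [List.getElem_map, List.getElem_range]
      rw [pvMx, pvG, List.getD_eq_getElem _ 0 (by simpa using h2)]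
  | succ s ih =>
    intro hs
    have h1 : (1 : Int) ≤ (s : Int) + 1 := by omega
    rw [show ((s + 1 : Nat) : Int) + 1 = ((s : Int) + 1) + 1 by push_cast; ring,
      PySem.List.pyRange_one_succ_right h1, List.foldl_append, ih (by omega), List.foldl_cons,
      List.foldl_nil]
    have hsl : s + 1 < matrice.length := by omega
    have hrowlen : (matrice.getD 0 []).length ≤ (matrice.getD (s + 1) []).length := by
      refine hpre.2 _ ?_
      rw [List.getD_eq_getElem _ [] hsl]
      exact List.getElem_mem hsl
    unfold pvStep
    refine Prod.ext ?_ ?_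
    · -- maxes: zipWith max step
      show List.zipWith (fun a b => if b > a then b else a)
          ((List.range (matrice.getD 0 []).length).map (fun j => pvMx matrice s j))
          (PySem.List.pyGetD matrice ((s : Int) + 1) []) =
        (List.range (matrice.getD 0 []).length).map (fun j => pvMx matrice (s + 1) j)
      have hrow : PySem.List.pyGetD matrice ((s : Int) + 1) [] = matrice.getD (s + 1) [] := by
        rw [show ((s : Int) + 1) = ((s + 1 : Nat) : Int) by push_cast; ring,
          PySem.List.pyGetD_natCast]
      rw [hrow]
      apply List.ext_getElem
      · simp only [List.length_zipWith, List.length_map, List.length_range]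
        omega
      · intro k hk1 hk2
        have hkm : k < (matrice.getD 0 []).length := by simpa using hk2
        rw [List.getElem_zipWith, List.getElem_map, List.getElem_range]
        simp only [List.getElem_map, List.getElem_range]
        have hg : (matrice.getD (s + 1) [])[k]'(by omega) = pvG matrice (s + 1) k := by
          rw [pvG, List.getD_eq_getElem _ 0 (by omega)]
        rw [hg, pvMx]
        rcases le_or_gt (pvG matrice (s + 1) k) (pvMx matrice s k) with h | h
        · rw [if_neg (by omega), max_eq_left h]
        · rw [if_pos h, max_eq_right (by omega)]
    · -- res: append the new row's invisible cells
      show (pvRes matrice (matrice.getD 0 []).length s) ++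
          (PySem.List.pyRange 0 ((matrice.getD 0 []).length : Int) 1).filterMap (fun j =>
            if PySem.List.pyGetD
                ((List.range (matrice.getD 0 []).length).map (fun j => pvMx matrice s j)) j 0 ≥
               PySem.List.pyGetD (PySem.List.pyGetD matrice ((s : Int) + 1) []) j 0
            then some (((s : Int) + 1), j) else none) =
        pvRes matrice (matrice.getD 0 []).length (s + 1)
      have hrow : PySem.List.pyGetD matrice ((s : Int) + 1) [] = matrice.getD (s + 1) [] := by
        rw [show ((s : Int) + 1) = ((s + 1 : Nat) : Int) by push_cast; ring,
          PySem.List.pyGetD_natCast]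
      rw [hrow, PySem.List.pyRange_zero_nat, List.filterMap_map]
      have hterm : ∀ j ∈ List.range (matrice.getD 0 []).length,
          ((fun j : Int =>
            if PySem.List.pyGetD
                ((List.range (matrice.getD 0 []).length).map (fun j => pvMx matrice s j)) j 0 ≥
               PySem.List.pyGetD (matrice.getD (s + 1) []) j 0
            then some (((s : Int) + 1), j) else none) ∘ (fun k : Nat => (k : Int))) j =
          (if pvMx matrice s j ≥ pvG matrice (s + 1) j
           then some (((s + 1 : Nat) : Int), (j : Int)) else none) := by
        intro j hj
        have hjm : j < (matrice.getD 0 []).length := List.mem_range.mp hj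
        simp only [Function.comp, PySem.List.pyGetD_natCast]
        rw [List.getD_eq_getElem _ 0 (by simpa using hjm), List.getElem_map, List.getElem_range]
        rw [show (matrice.getD (s + 1) []).getD j 0 = pvG matrice (s + 1) j from rfl]
        split <;> simp
      rw [List.filterMap_congr hterm, pvRes, pvRes, List.range'_concat, List.flatMap_append,
        List.flatMap_cons, List.flatMap_nil, List.append_nil]
      congr 1
      apply List.filterMap_congr
      intro j _
      rw [show 1 + 1 * s = s + 1 by omega, Nat.add_sub_cancel]

theorem pvB_eq (matrice : List (List Int)) (hpre : Pre_locuri_nevizibile matrice)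
    (n' : Nat) (hn : matrice.length = n' + 1) :
    locuri_nevizibile_alt matrice = pvRes matrice (matrice.getD 0 []).length n' := by
  have hA : locuri_nevizibile_alt matrice =
      ((PySem.List.pyRange 1 (matrice.length : Int) 1).foldl
        (pvStep matrice ((PySem.List.pyGetD matrice 0 []).length : Int))
        (PySem.List.slice (PySem.List.pyGetD matrice 0 [])
          none (some ((PySem.List.pyGetD matrice 0 []).length : Int)),
         ([] : List (Int × Int)))).2 := rfl
  rw [hA]
  simp only [PySem.List.pyGetD_zero]
  rw [show (matrice.length : Int) = ((n' : Int) + 1) by rw [hn]; push_cast; ring]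
  rw [pvB_inv matrice hpre n' (by omega)]

-- ===== VERDICT (by name: the statement is the Claim_ definition above) =====
theorem locuri_nevizibile_spec : Claim_equal_locuri_nevizibile := by
  intro matrice _ hpre
  unfold Spec_locuri_nevizibile
  obtain ⟨n', hn⟩ : ∃ n', matrice.length = n' + 1 := by
    have : matrice ≠ [] := hpre.1
    exact ⟨matrice.length - 1, by cases matrice <;> simp_all⟩
  rw [pvA_eq matrice n' hn, pvB_eq matrice hpre n' hn]
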